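-- pv_equiv track=rewrite | github.com/Honuratus/PySysCheck | pysyscheck.py | _parse_distro_info
-- ===== SOURCE A (Python) =====
-- def _parse_distro_info(content):
--     distro_name = "Unknown Linux"
--     if not content: return distro_name
--
--     for line in content.split("\n"):
--         if line.startswith('PRETTY_NAME='):
--             distro_name = line.split('=',1)[1].replace('"', '').strip()
--             break
--
--     return distro_name
-- ===== SOURCE B (Python) =====
-- def _extract(value):
--     return value.split('\n', 1)[0].replace('"', '').strip()
--
-- def _parse_distro_info(content):
--     distro_name = "Unknown Linux"
--     if not content:
--         return distro_name
--     if content.startswith('PRETTY_NAME='):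
--         return _extract(content[len('PRETTY_NAME='):])
--     i = content.find('\nPRETTY_NAME=')
--     if i == -1:
--         return distro_name
--     return _extract(content[i + len('\nPRETTY_NAME='):])
-- ===== Notes on version B (the rewrite author's own statement) =====
-- stated objective: alternative
-- what changed: Replaces the split-all-lines-and-loop scan with a single substring search for the key at a line start (a startswith check for the first line, else one str.find) and extracts the value by slicing, never materializing the line list.
import Mathlib
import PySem

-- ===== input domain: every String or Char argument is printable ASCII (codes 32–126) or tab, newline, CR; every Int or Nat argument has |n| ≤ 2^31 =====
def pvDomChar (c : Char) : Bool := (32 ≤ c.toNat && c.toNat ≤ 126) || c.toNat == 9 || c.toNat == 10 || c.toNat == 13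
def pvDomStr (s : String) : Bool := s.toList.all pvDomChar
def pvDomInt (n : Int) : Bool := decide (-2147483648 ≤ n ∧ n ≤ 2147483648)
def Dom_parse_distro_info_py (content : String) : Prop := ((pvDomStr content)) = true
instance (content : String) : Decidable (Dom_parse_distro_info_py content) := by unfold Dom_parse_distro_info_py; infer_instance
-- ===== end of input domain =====

-- B replaces A's split-all-lines-and-loop with one substring search for the key at a line start, plus slicing (objective: alternative).

-- ===== PORT A =====
-- the key 'PRETTY_NAME=' as a character list
def aKey : List Char := ['P', 'R', 'E', 'T', 'T', 'Y', '_', 'N', 'A', 'M', 'E', '=']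

-- line.split('=', 1)[1].replace('"', '').strip(); index 1 always exists here because
-- the caller guards with line.startswith('PRETTY_NAME='), so '=' occurs in line (.getD [] is dead)
def aProcess (line : List Char) : String :=
  String.ofList (PySem.Chars.strip (PySem.Chars.replace
    ((PySem.List.pyGet? (PySem.Chars.splitOnMax line ['='] 1) 1).getD []) ['"'] []))

-- the for-loop with its break: first line starting with 'PRETTY_NAME=' wins, else the default
def aLoop : List (List Char) → String
  | [] => "Unknown Linux"
  | line :: rest =>
      if PySem.Chars.startswith line aKey then aProcess line else aLoop rest

def parse_distro_info_py (content : String) : String :=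
  if content.toList.isEmpty then "Unknown Linux"
  else aLoop (PySem.Chars.splitOn content.toList ['\n'])

-- ===== PORT B =====
def bKey : List Char := ['P', 'R', 'E', 'T', 'T', 'Y', '_', 'N', 'A', 'M', 'E', '=']

-- value.split('\n', 1)[0].replace('"', '').strip(); split() never returns [] so [0] exists (.getD [] is dead)
def bExtract (value : List Char) : String :=
  String.ofList (PySem.Chars.strip (PySem.Chars.replace
    ((PySem.List.pyGet? (PySem.Chars.splitOnMax value ['\n'] 1) 0).getD []) ['"'] []))

def parse_distro_info_py_alt (content : String) : String :=
  if content.toList.isEmpty then "Unknown Linux"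
  else if PySem.Chars.startswith content.toList bKey then
    -- content[len('PRETTY_NAME='):]
    bExtract (PySem.Chars.slice content.toList (some 12) none)
  else
    -- i = content.find('\nPRETTY_NAME=')
    let i := PySem.Chars.find content.toList ('\n' :: bKey)
    if i = -1 then "Unknown Linux"
    else
      -- content[i + len('\nPRETTY_NAME='):]
      bExtract (PySem.Chars.slice content.toList (some (i + 13)) none)

-- ===== PRECONDITION & SPEC =====
def Spec_parse_distro_info_py (content : String) (out : String) : Prop := out = parse_distro_info_py_alt content
instance (content : String) (out : String) : Decidable (Spec_parse_distro_info_py content out) := by unfold Spec_parse_distro_info_py; infer_instance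

-- ===== CLAIM (what is proved, stated in full; the proofs are below) =====
def Claim_equal_parse_distro_info_py : Prop := ∀ (content : String), Dom_parse_distro_info_py content → Spec_parse_distro_info_py content (parse_distro_info_py content)

-- ===== LEMMAS AND PROOFS =====

-- the '\n'-decomposition of a list containing '\n'
theorem nl_decomp (l : List Char) (h : '\n' ∈ l) :
    l = l.takeWhile (· ≠ '\n') ++ '\n' :: (l.dropWhile (· ≠ '\n')).tail := by
  have hne : List.dropWhile (fun x => x ≠ '\n') l ≠ [] := by
    simp only [ne_eq, List.dropWhile_eq_nil_iff]
    push Not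
    exact ⟨'\n', h, by simp⟩
  have hh2 : (List.dropWhile (fun x => (x ≠ '\n' : Bool)) l).head hne = '\n' := by
    have := List.head_dropWhile_not (p := fun x => (x ≠ '\n' : Bool)) hne
    simpa using this
  conv_lhs => rw [← List.takeWhile_append_dropWhile (p := fun x => x ≠ '\n') (l := l)]
  congr 1
  conv_lhs => rw [← List.cons_head_tail hne, hh2]

theorem tailDrop_lt (l : List Char) (h : '\n' ∈ l) :
    ((l.dropWhile (· ≠ '\n')).tail).length < l.length := by
  have hne : List.dropWhile (fun x => (x ≠ '\n' : Bool)) l ≠ [] := by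
    simp only [ne_eq, List.dropWhile_eq_nil_iff]
    push Not
    exact ⟨'\n', h, by simp⟩
  have h1 := List.length_dropWhile_le (fun x => (x ≠ '\n' : Bool)) l
  have h2 : 1 ≤ (List.dropWhile (fun x => (x ≠ '\n' : Bool)) l).length := by
    cases hd : List.dropWhile (fun x => (x ≠ '\n' : Bool)) l with
    | nil => exact absurd hd hne
    | cons a as => simp
  rw [List.length_tail]
  omega

-- the line structure of a string: the lines of Python's content.split('\n')
def pyLines (l : List Char) : List (List Char) :=
  if h : '\n' ∈ l then l.takeWhile (· ≠ '\n') :: pyLines ((l.dropWhile (· ≠ '\n')).tail)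
  else [l]
termination_by l.length
decreasing_by exact tailDrop_lt l h

theorem takeWhile_all (p : Char → Bool) (l : List Char) (h : ∀ x ∈ l, p x) :
    l.takeWhile p = l := by
  simpa using List.takeWhile_append_of_pos (p := p) (l₂ := []) h

theorem pyLines_eq (l : List Char) :
    pyLines l = l.takeWhile (· ≠ '\n') ::
      (if '\n' ∈ l then pyLines ((l.dropWhile (· ≠ '\n')).tail) else []) := by
  rw [pyLines]
  split_ifs with h
  · rfl
  · rw [takeWhile_all]
    intro x hx
    simp only [ne_eq, decide_eq_true_eq]
    intro hc; exact h (hc ▸ hx)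

-- splitOnMax.go with the budget exhausted returns the remainder as one piece
theorem goMax_zero (sep : List Char) (fuel : Nat) (l cur acc) :
    PySem.Chars.splitOnMax.go sep fuel 0 l cur acc = acc.reverse ++ [cur.reverse ++ l] := by
  cases fuel <;> cases l <;> simp [PySem.Chars.splitOnMax.go]

-- splitOnMax.go with budget 1 and a one-character separator
theorem goMax_one (c : Char) (l : List Char) : ∀ (fuel : Nat) (cur : List Char) (_ : l.length < fuel) (acc' : List (List Char)),
    PySem.Chars.splitOnMax.go [c] fuel 1 l cur acc' =
      acc'.reverse ++ (if c ∈ l then [cur.reverse ++ l.takeWhile (· ≠ c), (l.dropWhile (· ≠ c)).tail]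
        else [cur.reverse ++ l]) := by
  induction l with
  | nil =>
    intro fuel cur hf acc'
    cases fuel with
    | zero => omega
    | succ f => simp [PySem.Chars.splitOnMax.go]
  | cons a rest ih =>
    intro fuel cur hf acc'
    cases fuel with
    | zero => omega
    | succ f =>
      by_cases hac : a = c
      · subst hac
        simp only [PySem.Chars.splitOnMax.go]
        rw [if_neg (by omega : ¬ (1:Nat) = 0)]
        rw [if_pos (by simp : [a].isPrefixOf (a :: rest) = true)]
        simp only [List.length_cons] at hf
        rw [goMax_zero]
        simp [List.takeWhile_cons, List.dropWhile_cons]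
      · simp only [PySem.Chars.splitOnMax.go]
        rw [if_neg (by omega : ¬ (1:Nat) = 0)]
        rw [if_neg (by simp; intro h; exact hac h.symm : ¬ [c].isPrefixOf (a :: rest) = true)]
        rw [ih f (a :: cur) (by simp at hf; omega) acc']
        simp only [List.takeWhile_cons, List.dropWhile_cons, List.mem_cons,
          decide_eq_true_eq, if_pos (show (a ≠ c) = True from by simp [hac])]
        split_ifs with h1 h2 h3 <;> simp_all


theorem splitOnMax_one (l : List Char) (c : Char) :
    PySem.Chars.splitOnMax l [c] 1 =
      if c ∈ l then [l.takeWhile (· ≠ c), (l.dropWhile (· ≠ c)).tail] else [l] := by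
  unfold PySem.Chars.splitOnMax
  rw [if_neg (by omega : ¬ (1:Int) < 0)]
  rw [show ((1:Int)).toNat = 1 from rfl, goMax_one c l (l.length+1) [] (by omega) []]
  simp

-- splitOn.go on separator ['\n'] produces pyLines
theorem goSplit (l : List Char) : ∀ (fuel : Nat) (cur : List Char) (acc : List (List Char)) (_ : l.length < fuel),
    PySem.Chars.splitOn.go ['\n'] fuel l cur acc =
      acc.reverse ++ (cur.reverse ++ l.takeWhile (· ≠ '\n')) ::
        (if '\n' ∈ l then pyLines ((l.dropWhile (· ≠ '\n')).tail) else []) := by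
  induction l with
  | nil =>
    intro fuel cur acc hf
    cases fuel with
    | zero => omega
    | succ f => simp [PySem.Chars.splitOn.go]
  | cons a rest ih =>
    intro fuel cur acc hf
    cases fuel with
    | zero => omega
    | succ f =>
      by_cases hac : a = '\n'
      · subst hac
        simp only [PySem.Chars.splitOn.go]
        rw [if_pos (by simp : ['\n'].isPrefixOf ('\n' :: rest) = true)]
        simp only [List.length_cons] at hf
        simp only [show (['\n'] : List Char).length = 1 from rfl, List.drop_succ_cons, List.drop_zero]
        rw [ih f [] (cur.reverse :: acc) (by omega)]
        simp only [List.takeWhile_cons, List.dropWhile_cons, decide_eq_true_eq, ne_eq,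
          not_true_eq_false, decide_false, if_false, List.mem_cons, true_or, if_true, List.tail_cons,
          List.reverse_cons, List.reverse_nil, List.nil_append, List.append_nil]
        simp only [decide_not, Bool.false_eq_true, if_false, List.tail_cons]
        rw [pyLines_eq rest]
        simp
      · simp only [PySem.Chars.splitOn.go]
        rw [if_neg (by simp; intro h; exact hac h.symm : ¬ ['\n'].isPrefixOf (a :: rest) = true)]
        rw [ih f (a :: cur) acc (by simp at hf; omega)]
        simp only [List.takeWhile_cons, List.dropWhile_cons, List.mem_cons, decide_eq_true_eq]
        split_ifs with h1 h2 h3 <;> simp_all <;> exact absurd h3.symm hac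

theorem splitOn_eq_pyLines (l : List Char) :
    PySem.Chars.splitOn l ['\n'] = pyLines l := by
  unfold PySem.Chars.splitOn
  rw [goSplit l (l.length+1) [] [] (by omega), pyLines_eq l]
  simp

-- A's value on a matching line equals the slice after the key
theorem aProcess_core (line : List Char) (h : bKey <+: line) :
    (PySem.List.pyGet? (PySem.Chars.splitOnMax line ['='] 1) 1).getD [] = line.drop 12 := by
  obtain ⟨v, rfl⟩ := h
  rw [splitOnMax_one]
  rw [if_pos (by simp [bKey] : '=' ∈ bKey ++ v)]
  have hpre : ∀ x ∈ (['P', 'R', 'E', 'T', 'T', 'Y', '_', 'N', 'A', 'M', 'E'] : List Char), (x ≠ '=' : Bool) := by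
    intro x hx; fin_cases hx <;> decide
  have hb : bKey ++ v = ['P', 'R', 'E', 'T', 'T', 'Y', '_', 'N', 'A', 'M', 'E'] ++ '=' :: v := by
    simp [bKey]
  rw [hb, List.dropWhile_append_of_pos hpre]
  simp [PySem.List.pyGet?, PySem.List.pyIdx?, List.dropWhile_cons]
theorem bExtract_core (v : List Char) :
    (PySem.List.pyGet? (PySem.Chars.splitOnMax v ['\n'] 1) 0).getD [] = v.takeWhile (· ≠ '\n') := by
  rw [splitOnMax_one]
  split_ifs with h
  · simp [PySem.List.pyGet?, PySem.List.pyIdx?]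
  · simp only [PySem.List.pyGet?, PySem.List.pyIdx?]
    rw [takeWhile_all]
    · simp
    · intro x hx; simp; intro hc; exact h (hc ▸ hx)
theorem find_eq_of (s sub : List Char) (k : Nat) (h1 : sub <+: s.drop k)
    (h2 : ∀ j < k, ¬ sub <+: s.drop j) : PySem.Chars.find s sub = (k : Int) := by
  have hin : PySem.Chars.isIn sub s = true := by
    rw [← PySem.Chars.exists_prefix_drop_iff_isIn]
    exact ⟨k, h1⟩
  have hinf : sub <:+: s := (PySem.Chars.isIn_iff_infix _ _).mp hin
  have h0 : 0 ≤ PySem.Chars.find s sub := (PySem.Chars.find_nonneg_iff _ _).mpr hinf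
  have hs := PySem.Chars.find_spec (s := s) (sub := sub) h0
  have hk : (PySem.Chars.find s sub).toNat = k := by
    by_contra hne
    rcases Nat.lt_or_ge (PySem.Chars.find s sub).toNat k with hlt | hge
    · exact h2 _ hlt hs.1
    · have : (PySem.Chars.find s sub).toNat ≠ k := hne
      have hklt : k < (PySem.Chars.find s sub).toNat := by omega
      exact hs.2 k hklt h1
  omega
theorem bKey_no_nl : ∀ x ∈ bKey, (x ≠ '\n' : Bool) := by
  intro x hx
  fin_cases hx <;> decide

-- a key prefix passes through takeWhile (no '\n' in the key)
theorem key_prefix_takeWhile (l : List Char) :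
    bKey <+: l.takeWhile (· ≠ '\n') ↔ bKey <+: l := by
  constructor
  · intro h
    exact h.trans (List.takeWhile_prefix _)
  · rintro ⟨v, rfl⟩
    rw [List.takeWhile_append_of_pos (by intro x hx; fin_cases hx <;> decide)]
    exact ⟨_, rfl⟩
theorem no_occ_in_first (t r : List Char) (ht : ∀ x ∈ t, (x ≠ '\n' : Bool)) :
    ∀ j < t.length, ¬ ('\n' :: bKey) <+: (t ++ '\n' :: r).drop j := by
  intro j hj hpre
  rw [List.drop_append_of_le_length (by omega)] at hpre
  rw [List.drop_eq_getElem_cons hj] at hpre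
  rw [List.cons_append, List.cons_prefix_cons] at hpre
  have := ht _ (List.getElem_mem hj)
  simp [hpre.1.symm] at this
theorem occ_at_nl (t r : List Char) :
    ('\n' :: bKey) <+: (t ++ '\n' :: r).drop t.length ↔ bKey <+: r := by
  rw [List.drop_left]
  rw [List.cons_prefix_cons]
  simp
theorem occ_after_nl (t r : List Char) (j : Nat) (hj : t.length + 1 ≤ j) :
    (t ++ '\n' :: r).drop j = r.drop (j - t.length - 1) := by
  rw [List.drop_append, List.drop_eq_nil_of_le (by omega),
    show j - t.length = (j - t.length - 1) + 1 by omega, List.drop_succ_cons]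
  simp
theorem main_eq (l : List Char) :
    aLoop (pyLines l) =
      (if PySem.Chars.startswith l bKey then bExtract (PySem.Chars.slice l (some 12) none)
       else if PySem.Chars.find l ('\n' :: bKey) = -1 then "Unknown Linux"
       else bExtract (PySem.Chars.slice l (some (PySem.Chars.find l ('\n' :: bKey) + 13)) none)) := by
  induction l using pyLines.induct with
  | case1 l h ih =>
    have ht : ∀ x ∈ List.takeWhile (fun c => (c ≠ '\n' : Bool)) l, (x ≠ '\n' : Bool) := by
      intro x hx
      exact List.mem_takeWhile_imp (p := fun c => (c ≠ '\n' : Bool)) hx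
    rw [pyLines_eq l, if_pos h]
    set t := List.takeWhile (fun c => (c ≠ '\n' : Bool)) l with hT
    set r := (List.dropWhile (fun c => (c ≠ '\n' : Bool)) l).tail with hR
    have hl : l = t ++ '\n' :: r := nl_decomp l h
    by_cases hk : bKey <+: l
    · have hswt : PySem.Chars.startswith t aKey = true := by
        rw [show aKey = bKey from rfl, PySem.Chars.startswith_iff]
        exact (key_prefix_takeWhile l).mpr hk
      have hswl : PySem.Chars.startswith l bKey = true := by
        rw [PySem.Chars.startswith_iff]; exact hk
      simp only [aLoop, hswt, hswl, if_true]
      unfold aProcess bExtract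
      rw [aProcess_core _ ((key_prefix_takeWhile l).mpr hk)]
      have hsl : PySem.Chars.slice l (some 12) none = l.drop 12 := by
        rw [PySem.Chars.slice_eq_listSlice]
        exact PySem.List.slice_from l (by omega)
      rw [hsl, bExtract_core]
      obtain ⟨v, hv⟩ := hk
      rw [← hv, List.takeWhile_append_of_pos bKey_no_nl,
        show (12:Nat) = bKey.length from rfl, List.drop_left, List.drop_left]
    · have hswt : ¬ (PySem.Chars.startswith t aKey = true) := by
        rw [show aKey = bKey from rfl, PySem.Chars.startswith_iff]
        exact fun hp => hk ((key_prefix_takeWhile l).mp hp)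
      have hswl : ¬ (PySem.Chars.startswith l bKey = true) := by
        rw [PySem.Chars.startswith_iff]; exact hk
      simp only [aLoop]
      rw [if_neg hswt, if_neg hswl, ih]
      by_cases hr : bKey <+: r
      · have hswr : PySem.Chars.startswith r bKey = true := by
          rw [PySem.Chars.startswith_iff]; exact hr
        rw [if_pos hswr]
        have hfl : PySem.Chars.find l ('\n' :: bKey) = (t.length : Int) := by
          apply find_eq_of
          · rw [hl]
            exact (occ_at_nl t r).mpr hr
          · intro j hj hpre
            rw [hl] at hpre
            exact no_occ_in_first t r ht j hj hpre
        rw [hfl, if_neg (by omega : ¬ ((t.length : Int) = -1))]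
        have hs2 : PySem.Chars.slice l (some ((t.length : Int) + 13)) none = r.drop 12 := by
          rw [PySem.Chars.slice_eq_listSlice]
          rw [PySem.List.slice_from l (by omega)]
          rw [show ((t.length : Int) + 13).toNat = t.length + 13 from by omega]
          rw [hl, occ_after_nl t r _ (by omega)]
          congr 1
          omega
        have hs3 : PySem.Chars.slice r (some 12) none = r.drop 12 := by
          rw [PySem.Chars.slice_eq_listSlice]
          exact PySem.List.slice_from r (by omega)
        rw [hs2, hs3]
      · have hswr : ¬ (PySem.Chars.startswith r bKey = true) := by
          rw [PySem.Chars.startswith_iff]; exact hr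
        rw [if_neg hswr]
        by_cases hfr : PySem.Chars.find r ('\n' :: bKey) = -1
        · have hfl : PySem.Chars.find l ('\n' :: bKey) = -1 := by
            rw [PySem.Chars.find_eq_neg_one_iff]
            intro hinf
            have hin : PySem.Chars.isIn ('\n' :: bKey) l = true :=
              (PySem.Chars.isIn_iff_infix _ _).mpr hinf
            obtain ⟨j, hj⟩ := (PySem.Chars.exists_prefix_drop_iff_isIn _ _).mpr hin
            rw [hl] at hj
            rcases Nat.lt_trichotomy j t.length with hlt | heq | hgt
            · exact no_occ_in_first t r ht j hlt hj
            · exact hr ((occ_at_nl t r).mp (heq ▸ hj))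
            · rw [occ_after_nl t r j (by omega)] at hj
              have : PySem.Chars.isIn ('\n' :: bKey) r = true :=
                (PySem.Chars.exists_prefix_drop_iff_isIn _ _).mp ⟨_, hj⟩
              exact ((PySem.Chars.find_ne_neg_one_iff _ _).mpr
                ((PySem.Chars.isIn_iff_infix _ _).mp this)) hfr
          rw [hfl, if_pos rfl, if_pos hfr]
        · have h0r : 0 ≤ PySem.Chars.find r ('\n' :: bKey) := by
            have := PySem.Chars.neg_one_le_find r ('\n' :: bKey)
            omega
          have hjr : PySem.Chars.find r ('\n' :: bKey) =
              ((PySem.Chars.find r ('\n' :: bKey)).toNat : Int) := by omega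
          have hsp := PySem.Chars.find_spec (s := r) (sub := '\n' :: bKey) h0r
          set jn := (PySem.Chars.find r ('\n' :: bKey)).toNat with hjn
          have hfl : PySem.Chars.find l ('\n' :: bKey) = ((t.length + 1 + jn : Nat) : Int) := by
            apply find_eq_of
            · rw [hl, occ_after_nl t r _ (by omega)]
              have : t.length + 1 + jn - t.length - 1 = jn := by omega
              rw [this]
              exact hsp.1
            · intro j hj hpre
              rw [hl] at hpre
              rcases Nat.lt_trichotomy j t.length with hlt | heq | hgt
              · exact no_occ_in_first t r ht j hlt hpre
              · exact hr ((occ_at_nl t r).mp (heq ▸ hpre))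
              · rw [occ_after_nl t r j (by omega)] at hpre
                exact hsp.2 (j - t.length - 1) (by omega) hpre
          rw [hfl, if_neg (by omega : ¬ (((t.length + 1 + jn : Nat) : Int) = -1)),
            if_neg hfr]
          have hs2 : PySem.Chars.slice l (some (((t.length + 1 + jn : Nat) : Int) + 13)) none
              = r.drop (jn + 13) := by
            rw [PySem.Chars.slice_eq_listSlice]
            rw [PySem.List.slice_from l (by omega)]
            rw [show ((((t.length + 1 + jn : Nat) : Int)) + 13).toNat = t.length + 1 + jn + 13
              from by omega]
            rw [hl, occ_after_nl t r _ (by omega)]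
            congr 1
            omega
          have hs3 : PySem.Chars.slice r (some (PySem.Chars.find r ('\n' :: bKey) + 13)) none
              = r.drop (jn + 13) := by
            rw [PySem.Chars.slice_eq_listSlice]
            rw [PySem.List.slice_from r (by omega)]
            congr 1
            omega
          rw [hs2, hs3]
  | case2 l h =>
    rw [pyLines_eq l, if_neg h, takeWhile_all _ _ (by
      intro x hx
      simp only [ne_eq, decide_eq_true_eq]
      intro hc
      exact h (hc ▸ hx))]
    simp only [aLoop]
    by_cases hk : bKey <+: l
    · have hswl : PySem.Chars.startswith l bKey = true := by
        rw [PySem.Chars.startswith_iff]; exact hk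
      rw [show aKey = bKey from rfl]
      rw [if_pos hswl, if_pos hswl]
      unfold aProcess bExtract
      rw [aProcess_core _ hk]
      have hsl : PySem.Chars.slice l (some 12) none = l.drop 12 := by
        rw [PySem.Chars.slice_eq_listSlice]
        exact PySem.List.slice_from l (by omega)
      rw [hsl, bExtract_core]
      rw [takeWhile_all]
      intro x hx
      simp only [ne_eq, decide_eq_true_eq]
      intro hc
      exact h (hc ▸ List.mem_of_mem_drop hx)
    · have hswl : ¬ (PySem.Chars.startswith l bKey = true) := by
        rw [PySem.Chars.startswith_iff]; exact hk
      rw [show aKey = bKey from rfl]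
      rw [if_neg hswl, if_neg hswl]
      have hfl : PySem.Chars.find l ('\n' :: bKey) = -1 := by
        rw [PySem.Chars.find_eq_neg_one_iff]
        intro hinf
        exact h (hinf.subset (by simp))
      rw [hfl, if_pos rfl]

-- ===== VERDICT (by name: the statement is the Claim_ definition above) =====
theorem parse_distro_info_py_spec : Claim_equal_parse_distro_info_py := by
  intro content _
  unfold Spec_parse_distro_info_py parse_distro_info_py parse_distro_info_py_alt
  by_cases h : content.toList.isEmpty <;> simp only [h, if_true, if_false]
  rw [splitOn_eq_pyLines, main_eq]
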